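-- pv_equiv track=rewrite | github.com/CiscoDevNet/Hyperflex-Hypercheck | HXTool.py | pingstatus
-- ===== SOURCE A (Python) =====
-- def pingstatus(op):
--     pgst = "PASS"
--     for line in op:
--         if "Not able to run the command" in line or "Network is unreachable" in line:
--             pgst = "FAIL"
--         elif "0 packets received" in line or "100% packet loss" in line or " 0 received" in line:
--             pgst = "FAIL"
--         elif ", 0% packet loss" in line:
--             pgst = "PASS"
--     return pgst
-- ===== SOURCE B (Python) =====
-- def pingstatus(op):
--     # reverse scan with early return: the last matching line decides, so the
--     # first match when scanning from the end gives the answer immediately.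
--     items = list(op)
--     for line in reversed(items):
--         if ("Not able to run the command" in line or "Network is unreachable" in line
--                 or "0 packets received" in line or "100% packet loss" in line
--                 or " 0 received" in line):
--             return "FAIL"
--         if ", 0% packet loss" in line:
--             return "PASS"
--     return "PASS"
-- ===== Notes on version B (the rewrite author's own statement) =====
-- stated objective: alternative
-- what changed: Replaced the forward accumulate-and-overwrite fold with a reverse scan that returns at the first matching line (last forward match = first reverse match), merging the two FAIL branches into one test.
import Mathlib
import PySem

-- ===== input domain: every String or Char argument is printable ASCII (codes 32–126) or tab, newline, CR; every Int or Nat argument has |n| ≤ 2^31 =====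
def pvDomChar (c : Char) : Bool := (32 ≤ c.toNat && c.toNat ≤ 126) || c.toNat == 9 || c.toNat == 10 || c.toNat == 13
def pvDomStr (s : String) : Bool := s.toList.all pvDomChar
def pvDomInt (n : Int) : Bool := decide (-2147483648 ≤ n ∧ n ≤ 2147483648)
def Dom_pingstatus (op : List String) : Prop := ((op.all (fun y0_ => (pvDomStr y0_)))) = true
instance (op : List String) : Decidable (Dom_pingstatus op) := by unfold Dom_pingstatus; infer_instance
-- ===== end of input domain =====

-- B replaces A's forward accumulate-and-overwrite fold with a reverse scan that
-- returns at the first matching line (alternative decomposition, same cost).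


-- ===== PORT A =====
def pingstatus (op : List String) : String :=
  op.foldl (fun pgst line =>
    if PySem.Str.isIn "Not able to run the command" line || PySem.Str.isIn "Network is unreachable" line then
      "FAIL"
    else if PySem.Str.isIn "0 packets received" line || PySem.Str.isIn "100% packet loss" line
        || PySem.Str.isIn " 0 received" line then
      "FAIL"
    else if PySem.Str.isIn ", 0% packet loss" line then
      "PASS"
    else pgst) "PASS"

-- ===== PORT B =====
def pingstatusRevLoop : List String → String
  | [] => "PASS"
  | line :: rest =>
    if PySem.Str.isIn "Not able to run the command" line || PySem.Str.isIn "Network is unreachable" line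
        || PySem.Str.isIn "0 packets received" line || PySem.Str.isIn "100% packet loss" line
        || PySem.Str.isIn " 0 received" line then
      "FAIL"
    else if PySem.Str.isIn ", 0% packet loss" line then
      "PASS"
    else pingstatusRevLoop rest

def pingstatus_alt (op : List String) : String :=
  pingstatusRevLoop op.reverse

-- ===== PRECONDITION & SPEC =====
def Spec_pingstatus (op : List String) (out : String) : Prop := out = pingstatus_alt op
instance (op : List String) (out : String) : Decidable (Spec_pingstatus op out) := by unfold Spec_pingstatus; infer_instance

-- ===== CLAIM (what is proved, stated in full; the proofs are below) =====
def Claim_equal_pingstatus : Prop := ∀ (op : List String), Dom_pingstatus op → Spec_pingstatus op (pingstatus op)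

-- ===== LEMMAS AND PROOFS =====

-- reverse scan generalized over the default returned when nothing matches
def pvGo : List String → String → String
  | [], s => s
  | line :: rest, s =>
    if PySem.Str.isIn "Not able to run the command" line || PySem.Str.isIn "Network is unreachable" line
        || PySem.Str.isIn "0 packets received" line || PySem.Str.isIn "100% packet loss" line
        || PySem.Str.isIn " 0 received" line then
      "FAIL"
    else if PySem.Str.isIn ", 0% packet loss" line then
      "PASS"
    else pvGo rest s

lemma pvGo_append (ys : List String) (l : String) (s : String) :
    pvGo (ys ++ [l]) s =
      pvGo ys
        (if PySem.Str.isIn "Not able to run the command" l || PySem.Str.isIn "Network is unreachable" l then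
          "FAIL"
        else if PySem.Str.isIn "0 packets received" l || PySem.Str.isIn "100% packet loss" l
            || PySem.Str.isIn " 0 received" l then
          "FAIL"
        else if PySem.Str.isIn ", 0% packet loss" l then
          "PASS"
        else s) := by
  induction ys with
  | nil => simp [pvGo]; split_ifs <;> simp_all
  | cons y ys ih => simp [pvGo, ih]

lemma foldl_eq_pvGo_reverse (op : List String) (s : String) :
    op.foldl (fun pgst line =>
      if PySem.Str.isIn "Not able to run the command" line || PySem.Str.isIn "Network is unreachable" line then
        "FAIL"
      else if PySem.Str.isIn "0 packets received" line || PySem.Str.isIn "100% packet loss" line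
          || PySem.Str.isIn " 0 received" line then
        "FAIL"
      else if PySem.Str.isIn ", 0% packet loss" line then
        "PASS"
      else pgst) s = pvGo op.reverse s := by
  induction op generalizing s with
  | nil => rfl
  | cons l t ih => rw [List.foldl_cons, ih, List.reverse_cons, pvGo_append]

lemma revLoop_eq_pvGo (xs : List String) : pingstatusRevLoop xs = pvGo xs "PASS" := by
  induction xs with
  | nil => rfl
  | cons l t ih => simp only [pingstatusRevLoop, pvGo, ih]

-- ===== VERDICT (by name: the statement is the Claim_ definition above) =====
theorem pingstatus_spec : Claim_equal_pingstatus := by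
  intro op _
  unfold Spec_pingstatus pingstatus pingstatus_alt
  rw [revLoop_eq_pvGo, foldl_eq_pvGo_reverse]
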